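-- pv_equiv track=rewrite | github.com/emadero/ola-project-2025 | algorithms/__init__.py | enforce_capacity_constraint
-- ===== SOURCE A (Python) =====
-- from typing import Dict, List, Tuple, Any
--
-- def enforce_capacity_constraint(selected_products: Dict[int, bool],
--                               capacity: int) -> Dict[int, bool]:
--     """
--     Enforce production capacity constraint
--
--     Args:
--         selected_products: Dict mapping product_id -> whether to produce
--         capacity: Maximum number of products that can be produced
--
--     Returns:
--         Modified selection respecting capacity constraint
--     """
--     # Count total products selected
--     total_selected = sum(selected_products.values())
--
--     if total_selected <= capacity:
--         return selected_products
--
--     # If over capacity, prioritize somehow (this is a simple implementation)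
--     # More sophisticated algorithms might use different prioritization
--     constrained_selection = selected_products.copy()
--     selected_count = 0
--
--     for product_id in sorted(selected_products.keys()):
--         if selected_products[product_id] and selected_count < capacity:
--             constrained_selection[product_id] = True
--             selected_count += 1
--         else:
--             constrained_selection[product_id] = False
--
--     return constrained_selection
-- ===== SOURCE B (Python) =====
-- def enforce_capacity_constraint(selected_products, capacity):
--     if sum(selected_products.values()) <= capacity:
--         return selected_products
--     sel = [k for k, v in selected_products.items() if v]
--     return {k: v and sum(1 for j in sel if j < k) < capacity
--             for k, v in selected_products.items()}
-- ===== Notes on version B (the rewrite author's own statement) =====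
-- stated objective: alternative
-- what changed: Replaces A's sort-then-counter walk that mutates a dict copy with a sort-free rank-by-counting scheme: a key stays selected iff it is selected and fewer than capacity selected keys are smaller than it.
import Mathlib
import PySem

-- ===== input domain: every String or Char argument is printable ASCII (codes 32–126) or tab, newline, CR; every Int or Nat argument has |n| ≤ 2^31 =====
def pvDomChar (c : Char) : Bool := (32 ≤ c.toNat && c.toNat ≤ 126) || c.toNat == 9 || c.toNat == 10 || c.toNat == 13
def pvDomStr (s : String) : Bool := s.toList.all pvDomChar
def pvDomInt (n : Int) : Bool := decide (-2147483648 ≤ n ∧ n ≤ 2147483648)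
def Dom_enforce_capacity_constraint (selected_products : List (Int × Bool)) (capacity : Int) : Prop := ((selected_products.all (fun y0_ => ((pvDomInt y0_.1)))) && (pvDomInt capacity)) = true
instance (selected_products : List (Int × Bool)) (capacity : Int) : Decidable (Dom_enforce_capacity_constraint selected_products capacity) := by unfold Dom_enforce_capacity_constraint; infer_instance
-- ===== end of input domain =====

-- B replaces A's sorted counter walk by a sort-free rank-by-counting scheme: a key
-- stays selected iff it is selected and fewer than capacity selected keys are smaller
-- (objective: alternative; B is O(n^2), not faster).

-- ===== PORT A =====
def enforce_capacity_constraint (selected_products : List (Int × Bool)) (capacity : Int) : List (Int × Bool) :=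
  let d : PySem.Dict Int Bool := PySem.Dict.mk selected_products
  let total_selected : Int := (d.values.map (fun b => if b then (1 : Int) else 0)).sum
  if total_selected ≤ capacity then
    selected_products
  else
    let final := (PySem.List.sorted d.keys (fun k => k) false).foldl
      (fun (st : PySem.Dict Int Bool × Int) product_id =>
        if d.getD product_id false && decide (st.2 < capacity) then
          (st.1.insert product_id true, st.2 + 1)
        else
          (st.1.insert product_id false, st.2))
      (d, 0)
    final.1.items

-- ===== PORT B =====
def enforce_capacity_constraint_alt (selected_products : List (Int × Bool)) (capacity : Int) : List (Int × Bool) :=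
  if (selected_products.map (fun p => if p.2 then (1 : Int) else 0)).sum ≤ capacity then
    selected_products
  else
    let sel : List Int := (selected_products.filter (fun p => p.2)).map Prod.fst
    selected_products.map (fun p =>
      (p.1, p.2 && decide (((sel.filter (fun j => j < p.1)).map (fun _ => (1 : Int))).sum < capacity)))

-- ===== PRECONDITION & SPEC =====
-- Pre_ requires the keys to be distinct: the Python argument is a dict, which cannot
-- contain duplicate keys, so association lists with repeated keys represent no Python input.
def Pre_enforce_capacity_constraint (selected_products : List (Int × Bool)) (capacity : Int) : Prop :=
  (selected_products.map Prod.fst).Nodup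
instance (selected_products : List (Int × Bool)) (capacity : Int) : Decidable (Pre_enforce_capacity_constraint selected_products capacity) := by unfold Pre_enforce_capacity_constraint; infer_instance

def pvWitness_enforce_capacity_constraint : (List (Int × Bool)) × Int := ([(1, true), (2, true)], 1)

def Spec_enforce_capacity_constraint (selected_products : List (Int × Bool)) (capacity : Int) (out : List (Int × Bool)) : Prop := out = enforce_capacity_constraint_alt selected_products capacity
instance (selected_products : List (Int × Bool)) (capacity : Int) (out : List (Int × Bool)) : Decidable (Spec_enforce_capacity_constraint selected_products capacity out) := by unfold Spec_enforce_capacity_constraint; infer_instance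

-- ===== CLAIM (what is proved, stated in full; the proofs are below) =====
def Claim_equal_enforce_capacity_constraint : Prop := ∀ (selected_products : List (Int × Bool)) (capacity : Int), Dom_enforce_capacity_constraint selected_products capacity → Pre_enforce_capacity_constraint selected_products capacity → Spec_enforce_capacity_constraint selected_products capacity (enforce_capacity_constraint selected_products capacity)

-- ===== LEMMAS AND PROOFS =====

-- A's loop, with the dict mutation abstracted away: the list of (key, final value) pairs
-- A's pass assigns, in the order it assigns them.
def markECC (lookup : Int → Bool) (cap : Int) : List Int → Int → List (Int × Bool)
  | [], _ => []
  | k :: ks, c =>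
    if lookup k && decide (c < cap) then (k, true) :: markECC lookup cap ks (c + 1)
    else (k, false) :: markECC lookup cap ks c

-- A's fold equals inserting the markECC assignments one by one.
theorem foldA_eq_markECC (d : PySem.Dict Int Bool) (cap : Int) :
    ∀ (ks : List Int) (d0 : PySem.Dict Int Bool) (c : Int),
    (ks.foldl
      (fun (st : PySem.Dict Int Bool × Int) product_id =>
        if d.getD product_id false && decide (st.2 < cap) then
          (st.1.insert product_id true, st.2 + 1)
        else
          (st.1.insert product_id false, st.2))
      (d0, c)).1
    = (markECC (fun k => d.getD k false) cap ks c).foldl (fun acc p => acc.insert p.1 p.2) d0 := by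
  intro ks
  induction ks with
  | nil => intro d0 c; simp [markECC]
  | cons k ks ih =>
    intro d0 c
    rw [List.foldl_cons, markECC]
    by_cases h : (d.getD k false && decide (c < cap)) = true
    · rw [if_pos h, if_pos h, List.foldl_cons, ih]
    · rw [if_neg h, if_neg h, List.foldl_cons, ih]

-- The value markECC assigns to each (distinct) key is membership in the first
-- (cap − c) selected keys.
theorem markECC_eq_map (lookup : Int → Bool) (cap : Int) :
    ∀ (ks : List Int) (c : Int), ks.Nodup →
    markECC lookup cap ks c
      = ks.map (fun k => (k, decide (k ∈ (ks.filter lookup).take (cap - c).toNat))) := by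
  intro ks
  induction ks with
  | nil => intro c _; simp [markECC]
  | cons k ks ih =>
    intro c hnd
    have hk : k ∉ ks := (List.nodup_cons.mp hnd).1
    have hnd' : ks.Nodup := (List.nodup_cons.mp hnd).2
    by_cases hl : lookup k = true
    · by_cases hc : c < cap
      · have htn : (cap - c).toNat = (cap - (c + 1)).toNat + 1 := by omega
        have hcond : (lookup k && decide (c < cap)) = true := by simp [hl, hc]
        have hfil : (k :: ks).filter lookup = k :: ks.filter lookup := by
          simp [hl]
        rw [markECC, if_pos hcond, ih (c + 1) hnd', List.map_cons, hfil, htn,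
          List.take_succ_cons]
        congr 1
        · simp
        · apply List.map_congr_left
          intro x hx
          have hne : x ≠ k := fun he => hk (he ▸ hx)
          simp [hne]
      · have htn : (cap - c).toNat = 0 := by omega
        have hcond : ¬ ((lookup k && decide (c < cap)) = true) := by simp [hc]
        rw [markECC, if_neg hcond, ih c hnd', List.map_cons]
        simp [htn]
    · have hl' : lookup k = false := by simpa using hl
      have hcond : ¬ ((lookup k && decide (c < cap)) = true) := by simp [hl']
      have hfil : (k :: ks).filter lookup = ks.filter lookup := by
        simp [hl']
      have hkf : k ∉ (ks.filter lookup).take (cap - c).toNat := by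
        intro hmem
        exact hk (List.mem_of_mem_filter (List.take_subset _ _ hmem))
      rw [markECC, if_neg hcond, ih c hnd', List.map_cons, hfil]
      congr 1
      simp [hkf]

-- Folding inserts of (k, g k) over keys already present rewrites exactly those entries.
theorem foldl_insert_map_items (g : Int → Bool) :
    ∀ (ks : List Int) (d : PySem.Dict Int Bool), (∀ k ∈ ks, d.contains k = true) →
    ((ks.map (fun k => (k, g k))).foldl (fun acc (p : Int × Bool) => acc.insert p.1 p.2) d).items
      = d.items.map (fun p => if p.1 ∈ ks then (p.1, g p.1) else p) := by
  intro ks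
  induction ks with
  | nil => intro d _; simp
  | cons k ks ih =>
    intro d h
    have hc : d.contains k = true := h k (List.mem_cons_self ..)
    have h' : ∀ x ∈ ks, (d.insert k (g k)).contains x = true := by
      intro x hx
      rw [PySem.Dict.contains_insert]
      simp [h x (List.mem_cons_of_mem _ hx)]
    rw [List.map_cons, List.foldl_cons, ih (d.insert k (g k)) h',
      PySem.Dict.items_insert_of_contains _ _ hc, List.map_map]
    apply List.map_congr_left
    intro p _
    by_cases hpk : p.1 = k
    · by_cases hks : p.1 ∈ ks <;> simp [Function.comp, hpk]
    · have : (p.1 == k) = false := by simpa using hpk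
      by_cases hks : p.1 ∈ ks <;> simp [Function.comp, this, hpk, hks]

-- The keys A's loop keeps (in sorted order) are exactly the sorted selected keys.
theorem filter_sorted_keys (sp : List (Int × Bool)) (hnd : (sp.map Prod.fst).Nodup) :
    (PySem.List.sorted (sp.map Prod.fst) (fun k => k) false).filter
        (fun k => (PySem.Dict.mk sp).getD k false)
      = PySem.List.sorted ((sp.filter (fun p => p.2)).map Prod.fst) (fun k => k) false := by
  set lookup : Int → Bool := fun k => (PySem.Dict.mk sp).getD k false with hlookup
  set ks := PySem.List.sorted (sp.map Prod.fst) (fun k => k) false with hks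
  have hperm : ks.Perm (sp.map Prod.fst) := PySem.List.sorted_perm _ _ _
  have hndks : ks.Nodup := hperm.nodup_iff.mpr hnd
  have hle : ks.Pairwise (fun a b => a ≤ b) := by
    simpa using PySem.List.sorted_pairwise (xs := sp.map Prod.fst) (key := fun k => k)
  have hlt : (ks.filter lookup).Pairwise (fun a b : Int => a < b) := by
    refine List.Pairwise.filter _ ?_
    have := List.Pairwise.and hle hndks
    exact this.imp (fun h => lt_of_le_of_ne h.1 h.2)
  have hlv : ∀ p ∈ sp, lookup p.1 = p.2 := by
    intro p hp
    exact PySem.Dict.getD_of_mem_items (d := PySem.Dict.mk sp) hp hnd false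
  have hpermf : (ks.filter lookup).Perm ((sp.filter (fun p => p.2)).map Prod.fst) := by
    have h1 : (ks.filter lookup).Perm ((sp.map Prod.fst).filter lookup) := hperm.filter _
    have h2 : (sp.map Prod.fst).filter lookup = (sp.filter (fun p => lookup p.1)).map Prod.fst :=
      List.filter_map ..
    have h3 : sp.filter (fun p => lookup p.1) = sp.filter (fun p => p.2) :=
      List.filter_congr (fun p hp => by simp [hlv p hp])
    rw [h2, h3] at h1
    exact h1
  exact (PySem.List.sorted_eq_of_perm_of_pairwise_lt _ _ (fun k => k) hpermf hlt).symm

-- In a strictly increasing list, membership in the first m elements is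
-- 'member with fewer than m smaller elements'.
theorem mem_take_iff_countP_lt (x : Int) :
    ∀ (S : List Int) (m : ℕ), S.Pairwise (fun a b : Int => a < b) →
    (x ∈ S.take m ↔ x ∈ S ∧ S.countP (fun j => decide (j < x)) < m) := by
  intro S
  induction S with
  | nil => intro m _; simp
  | cons a S' ih =>
    intro m hp
    have ha : ∀ b ∈ S', a < b := fun b hb => (List.pairwise_cons.mp hp).1 b hb
    have hp' : S'.Pairwise (fun a b : Int => a < b) := (List.pairwise_cons.mp hp).2
    cases m with
    | zero => simp
    | succ m' =>
      rw [List.take_succ_cons]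
      by_cases hxa : x = a
      · subst hxa
        have hc0 : S'.countP (fun j => decide (j < x)) = 0 := by
          rw [List.countP_eq_zero]
          intro b hb
          simp [not_lt.mpr (le_of_lt (ha b hb))]
        simp [List.countP_cons, hc0]
      · by_cases hxS : x ∈ S'
        · have hax : a < x := ha x hxS
          have : (a :: S').countP (fun j => decide (j < x))
              = S'.countP (fun j => decide (j < x)) + 1 := by
            simp [List.countP_cons, hax]
          simp only [List.mem_cons, hxa, false_or, this]
          rw [ih m' hp']
          constructor
          · rintro ⟨h1, h2⟩; exact ⟨h1, by omega⟩
          · rintro ⟨h1, h2⟩; exact ⟨h1, by omega⟩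
        · have h1 : x ∉ S'.take m' := fun h => hxS (List.take_subset _ _ h)
          simp [hxa, hxS, h1]

-- ===== VERDICT (by name: the statement is the Claim_ definition above) =====
theorem enforce_capacity_constraint_spec : Claim_equal_enforce_capacity_constraint := by
  unfold Claim_equal_enforce_capacity_constraint
  intro sp cap _ hpre
  unfold Spec_enforce_capacity_constraint enforce_capacity_constraint enforce_capacity_constraint_alt
  have hpre' : (sp.map Prod.fst).Nodup := hpre
  have hvals : (PySem.Dict.mk sp).values = sp.map Prod.snd := rfl
  have htot : ((PySem.Dict.mk sp).values.map (fun b => if b then (1 : Int) else 0)).sum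
      = (sp.map (fun p => if p.2 then (1 : Int) else 0)).sum := by
    rw [hvals, List.map_map]; rfl
  simp only [htot]
  by_cases hbr : (sp.map (fun p => if p.2 then (1 : Int) else 0)).sum ≤ cap
  · simp [hbr]
  · simp only [hbr, if_false]
    set sel : List Int := (sp.filter (fun p => p.2)).map Prod.fst with hsel
    set lookup : Int → Bool := fun k => (PySem.Dict.mk sp).getD k false with hlookup
    set ks := PySem.List.sorted ((PySem.Dict.mk sp).keys) (fun k => k) false with hks
    have hkeys : (PySem.Dict.mk sp).keys = sp.map Prod.fst := rfl
    have hperm : ks.Perm (sp.map Prod.fst) := by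
      rw [hks, hkeys]; exact PySem.List.sorted_perm _ _ _
    have hndks : ks.Nodup := hperm.nodup_iff.mpr hpre'
    rw [foldA_eq_markECC, markECC_eq_map _ _ ks 0 hndks, foldl_insert_map_items]
    · have hitems : (PySem.Dict.mk sp).items = sp := rfl
      rw [hitems]
      apply List.map_congr_left
      intro p hp
      have hpk : p.1 ∈ ks := hperm.mem_iff.mpr (List.mem_map_of_mem hp)
      simp only [hpk, if_true]
      have hS : ks.filter lookup = PySem.List.sorted sel (fun k => k) false := by
        rw [hks, hkeys, hsel]; exact filter_sorted_keys sp hpre'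
      set S := PySem.List.sorted sel (fun k => k) false with hSdef
      have hpermS : S.Perm sel := PySem.List.sorted_perm _ _ _
      have hselnd : sel.Nodup := by
        have hsub : ((sp.filter (fun p => p.2)).map Prod.fst).Sublist (sp.map Prod.fst) :=
          List.Sublist.map Prod.fst List.filter_sublist
        rw [hsel]; exact hpre'.sublist hsub
      have hSlt : S.Pairwise (fun a b : Int => a < b) := by
        have hle : S.Pairwise (fun a b : Int => a ≤ b) := by
          simpa using PySem.List.sorted_pairwise (xs := sel) (key := fun k => k)
        have hndS : S.Nodup := hpermS.nodup_iff.mpr hselnd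
        exact (List.Pairwise.and hle hndS).imp (fun h => lt_of_le_of_ne h.1 h.2)
      -- B's sum of ones equals a countP
      have hsum : ((sel.filter (fun j => j < p.1)).map (fun _ => (1 : Int))).sum
          = (sel.countP (fun j => decide (j < p.1)) : Int) := by
        have hones : ∀ (l : List Int), (l.map (fun _ => (1 : Int))).sum = (l.length : Int) := by
          intro l
          induction l with
          | nil => simp
          | cons a t ih => simp [ih]; push_cast; ring
        rw [hones, List.countP_eq_length_filter]
      -- membership of p.1 in sel ↔ p.2
      have hmemsel : (p.1 ∈ sel) ↔ p.2 = true := by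
        constructor
        · intro hm
          rcases List.mem_map.mp (hsel ▸ hm) with ⟨q, hq, hq1⟩
          have hq2 := List.of_mem_filter hq
          have hqsp : q ∈ sp := List.mem_of_mem_filter hq
          have heq : q = p := List.inj_on_of_nodup_map hpre' hqsp hp hq1
          rw [← heq]; exact hq2
        · intro hv
          rw [hsel]
          exact List.mem_map_of_mem (List.mem_filter.mpr ⟨hp, hv⟩)
      have hcount : S.countP (fun j => decide (j < p.1)) = sel.countP (fun j => decide (j < p.1)) :=
        hpermS.countP_eq _
      rw [hS, hsum]
      have hmemS : (p.1 ∈ S) ↔ p.2 = true := by rw [hpermS.mem_iff]; exact hmemsel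
      have key : (p.1 ∈ List.take (cap - 0).toNat S)
          ↔ (p.2 = true ∧ (sel.countP (fun j => decide (j < p.1)) : Int) < cap) := by
        rw [mem_take_iff_countP_lt p.1 S ((cap - 0).toNat) hSlt, hcount, hmemS]
        constructor
        · rintro ⟨h1, h2⟩; exact ⟨h1, by omega⟩
        · rintro ⟨h1, h2⟩; exact ⟨h1, by omega⟩
      have hdec : decide (p.1 ∈ List.take (cap - 0).toNat S)
          = decide (p.2 = true ∧ (sel.countP (fun j => decide (j < p.1)) : Int) < cap) :=
        decide_eq_decide.mpr key
      rw [hdec]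
      by_cases hv : p.2 = true <;> simp [hv]
    · intro k hk
      rw [PySem.Dict.contains_eq_decide_mem_keys, hkeys]
      exact decide_eq_true (hperm.mem_iff.mp hk)
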